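-- pv_equiv track=rewrite | github.com/Arban19/rendezvousWithCassidoo | rotations.py | rotated_num
-- ===== SOURCE A (Python) =====
-- import math
--
-- def rotated_num(numbers):
--     min_value = math.inf
--     min_indices = []
--
--     for i, num in enumerate(numbers):
--         if num < min_value:
--             min_value = num
--             min_indices = [i]
--         elif num == min_value:
--             min_indices.append(i)
--
--     return max(min_indices)
-- ===== SOURCE B (Python) =====
-- def rotated_num(numbers):
--     m = min(numbers)
--     return max(i for i, n in enumerate(numbers) if n == m)
-- ===== Notes on version B (the rewrite author's own statement) =====
-- stated objective: simpler
-- what changed: Replaces the single running-candidate-list loop (tracking min value and accumulating its index list) with two plain passes: min() to find the value, then max over the indices where it occurs.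
import Mathlib
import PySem

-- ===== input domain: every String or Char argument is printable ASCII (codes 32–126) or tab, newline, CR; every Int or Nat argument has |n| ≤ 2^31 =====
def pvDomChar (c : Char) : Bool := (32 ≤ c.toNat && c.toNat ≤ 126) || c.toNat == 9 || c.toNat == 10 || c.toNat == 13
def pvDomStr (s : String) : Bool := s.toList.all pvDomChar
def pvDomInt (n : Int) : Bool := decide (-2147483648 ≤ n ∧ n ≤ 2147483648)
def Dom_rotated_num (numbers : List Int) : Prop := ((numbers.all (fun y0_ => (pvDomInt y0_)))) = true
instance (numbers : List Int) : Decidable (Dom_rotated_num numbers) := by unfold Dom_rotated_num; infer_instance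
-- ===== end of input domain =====

-- B replaces A's single running-candidate-list loop by two passes (find min, then max index where it occurs): simpler decomposition, same cost.


-- ===== PORT A =====
-- min_value starts at math.inf: modelled as Option Int, none = inf (every int is < inf).
def stepA (s : Option Int × List Int) (p : Int × Int) : Option Int × List Int :=
  match s.1 with
  | none => (some p.2, [p.1])
  | some mv =>
    if p.2 < mv then (some p.2, [p.1])
    else if p.2 == mv then (s.1, s.2 ++ [p.1])
    else s

def rotated_num (numbers : List Int) : Int :=
  let st := (PySem.List.enumerate numbers 0).foldl stepA (none, [])
  -- max(min_indices): raises on empty list; Pre_ excludes that, .getD 0 is unreachable there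
  (PySem.List.max? st.2 (fun x => x)).getD 0

-- ===== PORT B =====
def rotated_num_alt (numbers : List Int) : Int :=
  let m := (PySem.List.min? numbers (fun x => x)).getD 0
  (PySem.List.max? (((PySem.List.enumerate numbers 0).filter (fun p => p.2 == m)).map (·.1)) (fun x => x)).getD 0

-- ===== PRECONDITION & SPEC =====
-- A raises ValueError (max of empty sequence) on the empty list; so does B (min of empty).
def Pre_rotated_num (numbers : List Int) : Prop := numbers ≠ []
instance (numbers : List Int) : Decidable (Pre_rotated_num numbers) := by unfold Pre_rotated_num; infer_instance
def pvWitness_rotated_num : List Int := [3, 1, 4, 1]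

def Spec_rotated_num (numbers : List Int) (out : Int) : Prop := out = rotated_num_alt numbers
instance (numbers : List Int) (out : Int) : Decidable (Spec_rotated_num numbers out) := by unfold Spec_rotated_num; infer_instance

-- ===== CLAIM (what is proved, stated in full; the proofs are below) =====
def Claim_equal_rotated_num : Prop := ∀ (numbers : List Int), Dom_rotated_num numbers → Pre_rotated_num numbers → Spec_rotated_num numbers (rotated_num numbers)

-- ===== LEMMAS AND PROOFS =====

-- Invariant of A's loop: after scanning xs (nonempty), the state is (some (min xs), indices of min in enumerate xs 0).
theorem loopA_char (xs : List Int) (hxs : xs ≠ []) :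
    ∃ m, PySem.List.min? xs (fun x => x) = some m ∧
      (PySem.List.enumerate xs 0).foldl stepA (none, []) =
        (some m, ((PySem.List.enumerate xs 0).filter (fun p => p.2 == m)).map (·.1)) := by
  induction xs using List.reverseRecOn with
  | nil => exact absurd rfl hxs
  | append_singleton xs x ih =>
    rcases eq_or_ne xs [] with h | h
    · subst h
      refine ⟨x, ?_, ?_⟩ <;> simp [PySem.List.min?, PySem.List.enumerate, stepA]
    · obtain ⟨m, hm, hst⟩ := ih h
      have hmin := PySem.List.min?_isMin hm
      have henum : PySem.List.enumerate (xs ++ [x]) 0 =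
          PySem.List.enumerate xs 0 ++ [((xs.length : Int), x)] := by
        simp [PySem.List.enumerate_append]
      have hmapp : PySem.List.min? (xs ++ [x]) (fun y => y) = some (min m x) := by
        obtain ⟨y, t, rfl⟩ := List.exists_cons_of_ne_nil h
        rw [List.cons_append, PySem.List.min?_id_cons, List.foldl_append]
        rw [PySem.List.min?_id_cons] at hm
        simp_all
      rcases lt_trichotomy x m with hx | hx | hx
      · refine ⟨x, by rw [hmapp, min_eq_right hx.le], ?_⟩
        have hfilt : ((PySem.List.enumerate xs 0).filter (fun p => p.2 == x)) = [] := by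
          rw [List.filter_eq_nil_iff]
          intro p hp
          obtain ⟨k, hk, rfl⟩ := (PySem.List.mem_enumerate_iff _ _ _).1 hp
          have := hmin _ (List.getElem_mem hk)
          simp only [beq_iff_eq]
          omega
        rw [henum, List.foldl_append, hst]
        simp [stepA, hx, List.filter_append, hfilt]
      · subst hx
        refine ⟨x, by rw [hmapp, min_self], ?_⟩
        rw [henum, List.foldl_append, hst]
        simp [stepA, List.filter_append]
      · refine ⟨m, by rw [hmapp, min_eq_left hx.le], ?_⟩
        rw [henum, List.foldl_append, hst]
        have hne : ¬ (x == m) = true := by simp; omega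
        simp [stepA, not_lt.2 hx.le, hne, List.filter_append]

-- ===== VERDICT (by name: the statement is the Claim_ definition above) =====
theorem rotated_num_spec : Claim_equal_rotated_num := by
  intro numbers _ hpre
  obtain ⟨m, hm, hst⟩ := loopA_char numbers hpre
  show rotated_num numbers = rotated_num_alt numbers
  unfold rotated_num rotated_num_alt
  simp only [hst, hm, Option.getD_some]
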